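-- pv_equiv track=rewrite | github.com/iliin-ivig/case-transform | case_transform/split_into_parts.py | split_from_camel_case
-- ===== SOURCE A (Python) =====
-- def split_from_camel_case(identifier: str) -> list[str]:
--     result = [[]]
--     for letter in identifier:
--         if letter.isupper() and result[-1] != []:
--             result.append([])
--
--         result[-1].append(letter)
--
--     return [
--         ''.join(part)
--         for part in result
--     ]
-- ===== SOURCE B (Python) =====
-- def split_from_camel_case(identifier: str) -> list[str]:
--     # Greedy segment scan: each part is one char plus the following run of
--     # non-uppercase chars, taken by slicing; no per-char buffer maintenance.
--     if not identifier:
--         return ['']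
--     parts = []
--     rest = identifier
--     while rest:
--         k = 1
--         while k < len(rest) and not rest[k].isupper():
--             k += 1
--         parts.append(rest[:k])
--         rest = rest[k:]
--     return parts
-- ===== Notes on version B (the rewrite author's own statement) =====
-- stated objective: alternative
-- what changed: A maintains a growing list of per-part char buffers and appends every letter to the last one; B scans greedily with a two-level index loop, cutting each part out as one slice (one char plus the following non-uppercase run) and advancing past it.
import Mathlib
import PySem

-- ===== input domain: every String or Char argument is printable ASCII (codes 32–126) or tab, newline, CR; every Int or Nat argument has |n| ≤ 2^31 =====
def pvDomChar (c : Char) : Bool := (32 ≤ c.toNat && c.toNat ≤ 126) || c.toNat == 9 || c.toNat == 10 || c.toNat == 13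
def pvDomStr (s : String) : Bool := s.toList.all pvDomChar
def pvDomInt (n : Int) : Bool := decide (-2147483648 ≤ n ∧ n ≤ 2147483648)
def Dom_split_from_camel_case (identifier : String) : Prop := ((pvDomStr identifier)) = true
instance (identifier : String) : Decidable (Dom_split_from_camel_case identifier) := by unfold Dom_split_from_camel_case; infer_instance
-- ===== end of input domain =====

-- B is an alternative decomposition: a greedy segment scan by slicing instead of A's per-part char-buffer accumulation; same cost.

-- ===== PORT A =====
-- loop body of A: maybe open a new (empty) part, then append the letter to the last part
def splitAStep (result : List (List Char)) (letter : Char) : List (List Char) :=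
  let result := if PySem.Chars.isupper letter && !(result.getLastD [] == ([] : List Char))
    then result ++ [[]] else result
  result.dropLast ++ [result.getLastD [] ++ [letter]]

def split_from_camel_case (identifier : String) : List String :=
  (identifier.toList.foldl splitAStep [[]]).map (fun part => String.ofList part)

-- ===== PORT B =====
-- B's outer loop: cut off `rest[:k]` (head char plus the following non-uppercase run) and recurse on `rest[k:]`
def splitBGo : List Char → List (List Char)
  | [] => []
  | c :: rest =>
      (c :: rest.takeWhile (fun d => !PySem.Chars.isupper d))
        :: splitBGo (rest.dropWhile (fun d => !PySem.Chars.isupper d))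
termination_by l => l.length
decreasing_by
  have := List.length_dropWhile_le (fun d => !PySem.Chars.isupper d) rest
  simp; omega

def split_from_camel_case_alt (identifier : String) : List String :=
  match identifier.toList with
  | [] => [""]
  | c :: rest => (splitBGo (c :: rest)).map (fun part => String.ofList part)

-- ===== PRECONDITION & SPEC =====
def Spec_split_from_camel_case (identifier : String) (out : List String) : Prop := out = split_from_camel_case_alt identifier
instance (identifier : String) (out : List String) : Decidable (Spec_split_from_camel_case identifier out) := by unfold Spec_split_from_camel_case; infer_instance

-- ===== CLAIM (what is proved, stated in full; the proofs are below) =====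
def Claim_equal_split_from_camel_case : Prop := ∀ (identifier : String), Dom_split_from_camel_case identifier → Spec_split_from_camel_case identifier (split_from_camel_case identifier)

-- ===== LEMMAS AND PROOFS =====

theorem splitBGo_nil : splitBGo [] = [] := by rw [splitBGo]

theorem splitBGo_cons (c : Char) (rest : List Char) :
    splitBGo (c :: rest) =
      (c :: rest.takeWhile (fun d => !PySem.Chars.isupper d))
        :: splitBGo (rest.dropWhile (fun d => !PySem.Chars.isupper d)) := by
  rw [splitBGo]

-- A's fold with a nonempty last part produces B's segments
theorem splitA_fold_char (cs : List Char) : ∀ (init : List (List Char)) (seg : List Char),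
    seg ≠ [] →
    (cs.foldl splitAStep (init ++ [seg])) =
      init ++ ((seg ++ cs.takeWhile (fun d => !PySem.Chars.isupper d))
        :: splitBGo (cs.dropWhile (fun d => !PySem.Chars.isupper d))) := by
  induction cs with
  | nil => intro init seg _; simp [splitBGo_nil]
  | cons c cs ih =>
    intro init seg hseg
    by_cases hc : PySem.Chars.isupper c = true
    · have hstep : splitAStep (init ++ [seg]) c = (init ++ [seg]) ++ [[c]] := by
        simp [splitAStep, hc, hseg]
      simp only [List.foldl_cons, hstep]
      rw [ih (init ++ [seg]) [c] (by simp)]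
      simp [List.takeWhile_cons, hc, splitBGo_cons]
    · have hstep : splitAStep (init ++ [seg]) c = init ++ [seg ++ [c]] := by
        simp [splitAStep, hc]
      simp only [List.foldl_cons, hstep]
      rw [ih init (seg ++ [c]) (by simp)]
      simp [hc]

-- ===== VERDICT (by name: the statement is the Claim_ definition above) =====
theorem split_from_camel_case_spec : Claim_equal_split_from_camel_case := by
  intro identifier _
  unfold Spec_split_from_camel_case split_from_camel_case split_from_camel_case_alt
  cases h : identifier.toList with
  | nil => simp
  | cons c cs =>
    have hstep : splitAStep [[]] c = [] ++ [[c]] := by simp [splitAStep]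
    simp only [List.foldl_cons, hstep]
    rw [splitA_fold_char cs [] [c] (by simp)]
    simp [splitBGo_cons]
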